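-- pv_equiv track=rewrite | github.com/cellgeometry/heteromotility | heteromotility/hmtools.py | merge_flat_lists
-- ===== SOURCE A (Python) =====
-- import itertools
--
-- def merge_flat_lists(lists):
--     # lists = [
--     #           [ [...], [...], [...] ],
--     #           [ [...], [...], ... ], ...
--     #                                        ]
--     merged_list = []
--     n_rows = len(lists[0])
--     i = 0
--     while i < n_rows:
--         tmp_list = []
--         for l in lists:
--             tmp_list.append(l[i])
--
--         tmp_merged = list( itertools.chain( *tmp_list ) )
--         merged_list.append(tmp_merged)
--         i += 1
--
--     # merged_list = [ [all vals for one cell], [...], ... ]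
--     return merged_list
-- ===== SOURCE B (Python) =====
-- def merge_flat_lists(lists):
--     # Transposed iteration: preallocate one accumulator per row, then sweep the
--     # input lists on the outside, extending each row buffer in place.
--     merged = [[] for _ in range(len(lists[0]))]
--     for l in lists:
--         for i, row in enumerate(merged):
--             row.extend(l[i])
--     return merged
-- ===== Notes on version B (the rewrite author's own statement) =====
-- stated objective: alternative
-- what changed: Transposed the iteration: B preallocates one accumulator per row and sweeps the input lists on the outside, extending each row buffer in place, instead of A's row-major pass that builds a temporary list of slices per row and chains them.
import Mathlib
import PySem

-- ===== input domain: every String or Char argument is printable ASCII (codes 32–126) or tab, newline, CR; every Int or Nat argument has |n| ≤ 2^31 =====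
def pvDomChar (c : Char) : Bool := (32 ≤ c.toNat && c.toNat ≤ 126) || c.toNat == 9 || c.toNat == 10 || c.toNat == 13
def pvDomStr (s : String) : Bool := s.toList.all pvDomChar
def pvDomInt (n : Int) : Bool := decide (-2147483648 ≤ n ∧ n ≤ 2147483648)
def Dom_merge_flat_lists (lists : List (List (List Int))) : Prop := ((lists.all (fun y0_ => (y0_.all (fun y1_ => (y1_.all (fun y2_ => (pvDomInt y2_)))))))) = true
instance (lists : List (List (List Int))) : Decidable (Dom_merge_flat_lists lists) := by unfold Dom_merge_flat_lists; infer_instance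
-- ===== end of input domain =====

-- B transposes the iteration (list-major, accumulating into preallocated per-row buffers)
-- instead of A's row-major pass that builds a temporary list of slices per row and chains them.


-- ===== PORT A =====
def merge_flat_lists (lists : List (List (List Int))) : List (List Int) :=
  let n_rows : Int := (((PySem.List.pyGet? lists 0).getD []).length : Int)
  (PySem.List.pyRange 0 n_rows 1).foldl
    (fun merged_list i =>
      let tmp_list := lists.foldl (fun acc l => acc ++ [(PySem.List.pyGet? l i).getD []]) []
      merged_list ++ [tmp_list.flatten])
    []

-- ===== PORT B =====
def merge_flat_lists_alt (lists : List (List (List Int))) : List (List Int) :=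
  let n : Nat := ((PySem.List.pyGet? lists 0).getD []).length
  lists.foldl
    (fun merged l =>
      merged.mapIdx (fun i row => row ++ (PySem.List.pyGet? l (i : Int)).getD []))
    (List.replicate n [])

-- ===== PRECONDITION & SPEC =====
-- Pre_ excludes exactly the inputs where Python A raises IndexError: the empty outer list
-- (lists[0] fails) and ragged inputs where some inner list is shorter than lists[0].
def Pre_merge_flat_lists (lists : List (List (List Int))) : Prop :=
  lists ≠ [] ∧ ∀ l ∈ lists, (lists.headD []).length ≤ l.length
instance (lists : List (List (List Int))) : Decidable (Pre_merge_flat_lists lists) := by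
  unfold Pre_merge_flat_lists; infer_instance

def pvWitness_merge_flat_lists : List (List (List Int)) := [[[1], [2, 3]], [[4], []]]

def Spec_merge_flat_lists (lists : List (List (List Int))) (out : List (List Int)) : Prop := out = merge_flat_lists_alt lists
instance (lists : List (List (List Int))) (out : List (List Int)) : Decidable (Spec_merge_flat_lists lists out) := by unfold Spec_merge_flat_lists; infer_instance

-- ===== CLAIM (what is proved, stated in full; the proofs are below) =====
def Claim_equal_merge_flat_lists : Prop := ∀ (lists : List (List (List Int))), Dom_merge_flat_lists lists → Pre_merge_flat_lists lists → Spec_merge_flat_lists lists (merge_flat_lists lists)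

-- ===== LEMMAS AND PROOFS =====

-- per-list row getter both ports use
def pvGetRow (l : List (List Int)) (i : Int) : List Int := (PySem.List.pyGet? l i).getD []

lemma foldl_append_singleton {α β : Type} (f : α → β) :
    ∀ (xs : List α) (acc : List β),
      xs.foldl (fun a x => a ++ [f x]) acc = acc ++ xs.map f := by
  intro xs
  induction xs with
  | nil => intro acc; simp
  | cons x xs ih => intro acc; simp [ih]

-- A computes the row map over range(n_rows)
lemma portA_closed (lists : List (List (List Int))) :
    merge_flat_lists lists =
      (List.range ((PySem.List.pyGet? lists 0).getD []).length).map
        (fun (k : Nat) => (lists.map (fun l => pvGetRow l (k : Int))).flatten) := by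
  simp only [merge_flat_lists]
  rw [PySem.List.pyRange_one]
  simp only [foldl_append_singleton, List.nil_append, sub_zero, Int.toNat_natCast,
    List.map_map]
  simp [pvGetRow, Function.comp]

lemma mapIdx_id_fun (m : List (List Int)) : m.mapIdx (fun _ row => row) = m := by
  induction m with
  | nil => simp
  | cons x xs ih => simp [List.mapIdx_cons, ih]

lemma mapIdx_mapIdx {α β γ : Type} (g : Nat → α → β) (f : Nat → β → γ) :
    ∀ (xs : List α), (xs.mapIdx g).mapIdx f = xs.mapIdx (fun i x => f i (g i x)) := by
  intro xs
  induction xs generalizing f g with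
  | nil => simp
  | cons x xs ih => simp [List.mapIdx_cons, ih]

-- B's outer fold pushes all lists into one mapIdx over the accumulator
lemma portB_fold (lists : List (List (List Int))) :
    ∀ (m : List (List Int)),
      lists.foldl
        (fun merged l => merged.mapIdx (fun i row => row ++ pvGetRow l (i : Int))) m
      = m.mapIdx (fun i row => row ++ (lists.map (fun l => pvGetRow l (i : Int))).flatten) := by
  induction lists with
  | nil => intro m; simp [mapIdx_id_fun]
  | cons l ls ih =>
      intro m
      simp only [List.foldl_cons, ih, mapIdx_mapIdx]
      simp [List.append_assoc]

lemma mapIdx_replicate {β : Type} (f : Nat → List Int → β) :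
    ∀ (n : Nat), (List.replicate n ([] : List Int)).mapIdx f
      = (List.range n).map (fun i => f i []) := by
  intro n
  induction n generalizing f with
  | zero => simp
  | succ n ih =>
      simp [List.replicate_succ, List.mapIdx_cons, List.range_succ_eq_map, ih,
        List.map_map, Function.comp]

lemma portB_closed (lists : List (List (List Int))) :
    merge_flat_lists_alt lists =
      (List.range ((PySem.List.pyGet? lists 0).getD []).length).map
        (fun (k : Nat) => (lists.map (fun l => pvGetRow l (k : Int))).flatten) := by
  unfold merge_flat_lists_alt
  simp only [pvGetRow] at *
  rw [show (fun merged l => List.mapIdx (fun i row => row ++ (PySem.List.pyGet? l (i : Int)).getD []) merged)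
      = (fun merged l => List.mapIdx (fun i row => row ++ pvGetRow l (i : Int)) merged) from rfl]
  rw [portB_fold, mapIdx_replicate]
  simp [pvGetRow, PySem.List.pyGet?_natCast]

-- ===== VERDICT (by name: the statement is the Claim_ definition above) =====
theorem merge_flat_lists_spec : Claim_equal_merge_flat_lists := by
  intro lists _ _
  unfold Spec_merge_flat_lists
  rw [portA_closed, portB_closed]
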